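-- pv_equiv track=rewrite | github.com/shuckerino/Uni | Bioinformatics/Chapter04/Lab04/subtile_motive.py | get_neighbours_with_max_mismatches
-- ===== SOURCE A (Python) =====
-- base_order = "ACGT"
--
-- def get_neighbours_with_max_mismatches(pattern : str, d : int) -> set[str]:
--
--     def recursive_neighbour(current_pattern : str, left_mismatches : int, index : int):
--
--         # base case: no mismatches allowed or end of pattern
--         if left_mismatches == 0 or index == len(pattern):
--             all_neighbours.add(current_pattern)
--             return
--
--         # add current pattern without any changes
--         all_neighbours.add(current_pattern)
--
--         # get all combinations with all possible mismatches at this position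
--         for i in range(index, len(pattern)):
--             for base in base_order:
--                 if pattern[i] != base:
--                     # replace current character and call recursive function again
--                     mutated_pattern  = current_pattern[:i] + base + current_pattern[i+1:]
--                     recursive_neighbour(mutated_pattern, left_mismatches - 1, i+1)
--
--     all_neighbours = set()
--     recursive_neighbour(pattern, d, 0)
--     return all_neighbours
-- ===== SOURCE B (Python) =====
-- base_order = "ACGT"
--
-- def get_neighbours_with_max_mismatches(pattern: str, d: int) -> set[str]:
--     # Iterative DFS with an explicit work stack instead of nested recursion.
--     n = len(pattern)
--     all_neighbours = set()
--     stack = [(pattern, d, 0)]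
--     while stack:
--         cur, left, index = stack.pop()
--         all_neighbours.add(cur)
--         if left == 0 or index == n:
--             continue
--         children = []
--         for i in range(index, n):
--             for base in base_order:
--                 if pattern[i] != base:
--                     children.append((cur[:i] + base + cur[i + 1:], left - 1, i + 1))
--         stack.extend(reversed(children))
--     return all_neighbours
-- ===== Notes on version B (the rewrite author's own statement) =====
-- stated objective: alternative
-- what changed: Replaces A's nested recursion (recursive helper closing over the result set) with an iterative depth-first search over an explicit work stack: each popped entry is added to the set and its mutated children are pushed, so no recursion is used at all.
import Mathlib
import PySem

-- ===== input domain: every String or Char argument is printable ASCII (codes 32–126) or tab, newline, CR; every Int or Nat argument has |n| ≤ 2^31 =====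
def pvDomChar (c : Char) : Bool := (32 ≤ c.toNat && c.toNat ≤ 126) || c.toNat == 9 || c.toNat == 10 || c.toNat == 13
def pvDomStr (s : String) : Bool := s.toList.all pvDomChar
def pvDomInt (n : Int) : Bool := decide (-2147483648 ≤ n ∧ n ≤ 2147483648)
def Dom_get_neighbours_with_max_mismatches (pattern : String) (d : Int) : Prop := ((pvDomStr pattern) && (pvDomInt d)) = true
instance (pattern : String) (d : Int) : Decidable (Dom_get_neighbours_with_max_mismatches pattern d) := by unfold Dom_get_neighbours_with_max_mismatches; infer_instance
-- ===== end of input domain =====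

-- B replaces A's nested recursion by an iterative DFS over an explicit work stack (objective: alternative;
-- same visit order, no Python recursion-depth limit). Python sets are ported as PySem.Set (distinct elements
-- in insertion order); string slicing cur[:i] + base + cur[i+1:] is ported on List Char as take/append/drop,
-- exact since 0 ≤ i < len always holds at that line.

-- ===== PORT A =====
def pvBases : List Char := ['A', 'C', 'G', 'T']   -- base_order = "ACGT"

mutual
-- recursive_neighbour(current_pattern, left_mismatches, index)
def recA (patt cur : List Char) (left : Int) (index : Nat) (s : PySem.Set String) : PySem.Set String :=
  if left = 0 ∨ index = patt.length then PySem.Set.add s (String.ofList cur)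
  else loopA patt cur left index (PySem.Set.add s (String.ofList cur))
termination_by (2 * (patt.length - index) + 2) * 5

-- for i in range(index, len(pattern)):
def loopA (patt cur : List Char) (left : Int) (i : Nat) (s : PySem.Set String) : PySem.Set String :=
  if h : i < patt.length then
    loopA patt cur left (i + 1) (baseLoopA patt cur left i pvBases s)
  else s
termination_by (2 * (patt.length - i) + 1) * 5
decreasing_by all_goals (simp [pvBases]; omega)

-- for base in base_order: if pattern[i] != base: recurse on the mutated pattern
-- (the 'i < patt.length' guard only makes the function total; the callers always satisfy it)
def baseLoopA (patt cur : List Char) (left : Int) (i : Nat) (bs : List Char) (s : PySem.Set String) : PySem.Set String :=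
  if _h : i < patt.length then
    match bs with
    | [] => s
    | b :: rest =>
        baseLoopA patt cur left i rest
          (if PySem.List.pyGet? patt (i : Int) ≠ some b then
             recA patt (cur.take i ++ [b] ++ cur.drop (i + 1)) (left - 1) (i + 1) s
           else s)
  else s
termination_by 2 * (patt.length - i) * 5 + bs.length
end

def get_neighbours_with_max_mismatches (pattern : String) (d : Int) : List String :=
  recA pattern.toList pattern.toList d 0 PySem.Set.empty

-- ===== PORT B =====
-- the children list built by B's two nested for-loops for one popped stack entry
def childrenB (patt cur : List Char) (left : Int) (index : Nat) : List (List Char × Int × Nat) :=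
  (List.range' index (patt.length - index)).flatMap (fun (i : Nat) =>
    pvBases.filterMap (fun b =>
      if PySem.List.pyGet? patt (i : Int) ≠ some b then
        some (cur.take i ++ [b] ++ cur.drop (i + 1), left - 1, i + 1)
      else none))

-- termination weight for the work stack (each entry at position `index` weighs 5^(n-index))
lemma childrenB_cons (patt cur : List Char) (left : Int) (i : Nat) (h : i < patt.length) :
    childrenB patt cur left i =
      (pvBases.filterMap (fun b =>
        if PySem.List.pyGet? patt (i : Int) ≠ some b then
          some (cur.take i ++ [b] ++ cur.drop (i + 1), left - 1, i + 1)
        else none)) ++ childrenB patt cur left (i + 1) := by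
  unfold childrenB
  have h1 : patt.length - i = (patt.length - (i + 1)) + 1 := by omega
  rw [h1, List.range'_succ, List.flatMap_cons]

lemma childrenB_weight_aux (patt cur : List Char) (left : Int) :
    ∀ (k index : Nat), patt.length - index = k →
      ((childrenB patt cur left index).map (fun e => 5 ^ (patt.length - e.2.2))).sum + 1
        ≤ 5 ^ (patt.length - index) := by
  intro k
  induction k with
  | zero => intro index hk; simp [childrenB, hk]
  | succ k ih =>
    intro index hk
    have hlt : index < patt.length := by omega
    rw [childrenB_cons patt cur left index hlt, List.map_append, List.sum_append]
    set W := 5 ^ (patt.length - (index + 1)) with hW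
    have htail := ih (index + 1) (by omega)
    rw [← hW] at htail
    have hblock :
        (((pvBases.filterMap (fun b =>
            if PySem.List.pyGet? patt (index : Int) ≠ some b then
              some (cur.take index ++ [b] ++ cur.drop (index + 1), left - 1, index + 1)
            else none)).map (fun e => 5 ^ (patt.length - e.2.2))).sum) ≤ 4 * W := by
      have hmem : ∀ x ∈ ((pvBases.filterMap (fun b =>
            if PySem.List.pyGet? patt (index : Int) ≠ some b then
              some (cur.take index ++ [b] ++ cur.drop (index + 1), left - 1, index + 1)
            else none)).map (fun e => 5 ^ (patt.length - e.2.2))), x ≤ W := by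
        intro x hx
        simp only [List.mem_map, List.mem_filterMap] at hx
        obtain ⟨e, ⟨b, _, hb⟩, hx⟩ := hx
        split at hb
        · cases hb; simp [hW, ← hx]
        · cases hb
      have hlen : ((pvBases.filterMap (fun b =>
            if PySem.List.pyGet? patt (index : Int) ≠ some b then
              some (cur.take index ++ [b] ++ cur.drop (index + 1), left - 1, index + 1)
            else none)).map (fun e => 5 ^ (patt.length - e.2.2))).length ≤ 4 := by
        rw [List.length_map]
        calc _ ≤ pvBases.length := List.length_filterMap_le _ _
          _ = 4 := rfl
      calc _ ≤ _ • W := List.sum_le_card_nsmul _ W hmem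
        _ ≤ 4 * W := by simpa [smul_eq_mul] using Nat.mul_le_mul_right W hlen
    have hpow : 5 ^ (patt.length - index) = W * 5 := by
      rw [show patt.length - index = (patt.length - (index + 1)) + 1 by omega, pow_succ, hW]
    omega

lemma childrenB_weight (patt cur : List Char) (left : Int) (index : Nat) :
    ((childrenB patt cur left index).map (fun e => 5 ^ (patt.length - e.2.2))).sum + 1
      ≤ 5 ^ (patt.length - index) :=
  childrenB_weight_aux patt cur left _ index rfl

-- the while-stack loop; the Lean stack has its top at the HEAD, so Python's
-- 'stack.pop()' is the head and 'stack.extend(reversed(children))' is 'children ++ rest'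
def loopB (patt : List Char) (stack : List (List Char × Int × Nat)) (s : PySem.Set String) : PySem.Set String :=
  match stack with
  | [] => s
  | (cur, left, index) :: rest =>
    let s' := PySem.Set.add s (String.ofList cur)
    if left = 0 ∨ index = patt.length then loopB patt rest s'
    else loopB patt (childrenB patt cur left index ++ rest) s'
termination_by (stack.map (fun e => 5 ^ (patt.length - e.2.2))).sum
decreasing_by
  all_goals
    have _hp : 0 < 5 ^ (patt.length - index) := Nat.pow_pos (by omega)
    have hc := childrenB_weight patt cur left index
    simp at hc ⊢ <;> omega

def get_neighbours_with_max_mismatches_alt (pattern : String) (d : Int) : List String :=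
  loopB pattern.toList [(pattern.toList, d, 0)] PySem.Set.empty

-- ===== PRECONDITION & SPEC =====
def Spec_get_neighbours_with_max_mismatches (pattern : String) (d : Int) (out : List String) : Prop := out = get_neighbours_with_max_mismatches_alt pattern d
instance (pattern : String) (d : Int) (out : List String) : Decidable (Spec_get_neighbours_with_max_mismatches pattern d out) := by unfold Spec_get_neighbours_with_max_mismatches; infer_instance

-- ===== CLAIM (what is proved, stated in full; the proofs are below) =====
def Claim_equal_get_neighbours_with_max_mismatches : Prop := ∀ (pattern : String) (d : Int), Dom_get_neighbours_with_max_mismatches pattern d → Spec_get_neighbours_with_max_mismatches pattern d (get_neighbours_with_max_mismatches pattern d)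

-- ===== LEMMAS AND PROOFS =====

-- the inner base loop of A equals a fold of recA over the children B builds for position i
lemma baseLoopA_eq (patt cur : List Char) (left : Int) (i : Nat) (h : i < patt.length) :
    ∀ (bs : List Char) (s : PySem.Set String),
      baseLoopA patt cur left i bs s =
      (bs.filterMap (fun b =>
        if PySem.List.pyGet? patt (i : Int) ≠ some b then
          some (cur.take i ++ [b] ++ cur.drop (i + 1), left - 1, i + 1)
        else none)).foldl (fun s e => recA patt e.1 e.2.1 e.2.2 s) s := by
  intro bs
  induction bs with
  | nil => intro s; rw [baseLoopA]; simp [h]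
  | cons b rest ih =>
    intro s
    rw [baseLoopA, dif_pos h]
    by_cases hc : PySem.List.pyGet? patt (i : Int) ≠ some b
    · simp only [List.filterMap_cons, if_pos hc, List.foldl_cons]
      exact ih _
    · simp only [List.filterMap_cons, if_neg hc]
      exact ih _

-- folding recA over B's children list from position i is exactly A's position loop
lemma childrenB_foldl (patt cur : List Char) (left : Int) :
    ∀ (k i : Nat), patt.length - i = k → ∀ s,
      (childrenB patt cur left i).foldl (fun s e => recA patt e.1 e.2.1 e.2.2 s) s =
        loopA patt cur left i s := by
  intro k
  induction k with
  | zero =>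
    intro i hk s
    have hnlt : ¬ i < patt.length := by omega
    rw [loopA, dif_neg hnlt]
    simp [childrenB, hk]
  | succ k ih =>
    intro i hk s
    have hlt : i < patt.length := by omega
    rw [childrenB_cons patt cur left i hlt, List.foldl_append, ih (i + 1) (by omega)]
    conv_rhs => rw [loopA]
    rw [dif_pos hlt, baseLoopA_eq patt cur left i hlt]

-- the stack loop of B performs exactly A's recursion on each stack entry in order
lemma loopB_eq (patt : List Char) (stack : List (List Char × Int × Nat)) (s : PySem.Set String) :
    loopB patt stack s = stack.foldl (fun s e => recA patt e.1 e.2.1 e.2.2 s) s := by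
  fun_induction loopB patt stack s
  case case1 => rfl
  case case2 cur left index rest s hcond ih =>
    rw [ih, List.foldl_cons]
    congr 1
    rw [recA, if_pos hcond]
  case case3 cur left index rest s hcond ih =>
    rw [ih, List.foldl_append, childrenB_foldl patt cur left _ index rfl, List.foldl_cons]
    congr 1
    rw [recA, if_neg hcond]

-- ===== VERDICT (by name: the statement is the Claim_ definition above) =====
theorem get_neighbours_with_max_mismatches_spec : Claim_equal_get_neighbours_with_max_mismatches := by
  intro pattern d _
  unfold Spec_get_neighbours_with_max_mismatches
  unfold get_neighbours_with_max_mismatches get_neighbours_with_max_mismatches_alt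
  rw [loopB_eq, List.foldl_cons, List.foldl_nil]
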